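-- pv_equiv track=rewrite | github.com/thewh1teagle/renikud | src/aligner/align_test.py | normalize_ipa
-- ===== SOURCE A (Python) =====
-- def normalize_ipa(text: str) -> str:
--     """
--     Normalizes 'dirty' IPA characters to their standard versions
--     to match the cleaner alignment map.
--     """
--     replacements = {
--         "g": "ɡ",  # Standard IPA g
--         "x": "χ",  # Standard IPA chi
--         "r": "ʁ",  # Standard IPA resh
--     }
--     for old, new in replacements.items():
--         text = text.replace(old, new)
--     return text
-- ===== SOURCE B (Python) =====
-- def normalize_ipa(text: str) -> str:
--     """
--     Normalizes 'dirty' IPA characters to their standard versions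
--     in a single pass over the characters.
--     """
--     mapping = {"g": "\u0261", "x": "\u03c7", "r": "\u0281"}
--     return "".join(mapping.get(c, c) for c in text)
-- ===== Notes on version B (the rewrite author's own statement) =====
-- stated objective: idiomatic
-- what changed: Replaced three full-string replace passes (one per rule) with a single pass over the characters doing one dict lookup per character and joining the results.
import Mathlib
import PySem

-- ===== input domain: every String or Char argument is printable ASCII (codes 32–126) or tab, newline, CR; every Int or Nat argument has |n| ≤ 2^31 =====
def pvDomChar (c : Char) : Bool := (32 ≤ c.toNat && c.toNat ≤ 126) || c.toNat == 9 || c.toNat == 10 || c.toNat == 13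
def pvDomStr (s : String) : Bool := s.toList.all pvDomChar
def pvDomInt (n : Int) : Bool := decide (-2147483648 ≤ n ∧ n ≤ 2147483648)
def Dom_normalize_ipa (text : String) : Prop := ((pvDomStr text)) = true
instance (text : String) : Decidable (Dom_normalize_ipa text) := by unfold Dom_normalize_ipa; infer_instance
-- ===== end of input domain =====

-- B does one pass over the characters with a per-character dict lookup instead of A's three full-string replace passes (objective: idiomatic).

-- ===== PORT A =====
-- the dict literal of A, as an association list of (old, new) rules, iterated in insertion order
def normalize_ipa_replacements : List (String × String) :=
  [("g", "ɡ"), ("x", "χ"), ("r", "ʁ")]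

def normalize_ipa (text : String) : String :=
  normalize_ipa_replacements.foldl (fun t p => PySem.Str.replace t p.1 p.2) text

-- ===== PORT B =====
def normalize_ipa_alt (text : String) : String :=
  let mapping : PySem.Dict Char Char :=
    ((PySem.Dict.empty.insert 'g' 'ɡ').insert 'x' 'χ').insert 'r' 'ʁ'
  String.ofList (text.toList.map (fun c => mapping.getD c c))

-- ===== PRECONDITION & SPEC =====
def Spec_normalize_ipa (text : String) (out : String) : Prop := out = normalize_ipa_alt text
instance (text : String) (out : String) : Decidable (Spec_normalize_ipa text out) := by unfold Spec_normalize_ipa; infer_instance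

-- ===== CLAIM (what is proved, stated in full; the proofs are below) =====
def Claim_equal_normalize_ipa : Prop := ∀ (text : String), Dom_normalize_ipa text → Spec_normalize_ipa text (normalize_ipa text)

-- ===== LEMMAS AND PROOFS =====

-- replace.go with a single-char pattern and single-char replacement is a map
theorem replace_go_single (o n : Char) :
    ∀ (fuel : Nat) (l acc : List Char), l.length ≤ fuel →
      PySem.Chars.replace.go [o] [n] fuel l acc
        = acc.reverse ++ l.map (fun c => if c = o then n else c) := by
  intro fuel
  induction fuel with
  | zero =>
    intro l acc h
    have : l = [] := List.eq_nil_of_length_eq_zero (Nat.le_zero.mp h)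
    subst this
    simp [PySem.Chars.replace.go]
  | succ f ih =>
    intro l acc h
    cases l with
    | nil => simp [PySem.Chars.replace.go]
    | cons c t =>
      by_cases hc : c = o
      · subst hc
        have hpre : List.isPrefixOf [c] (c :: t) = true := by
          simp [List.isPrefixOf]
        rw [PySem.Chars.replace.go]
        simp only [hpre, if_true]
        simp only [List.length_cons, List.length_nil, List.drop_succ_cons, List.drop_zero]
        rw [ih t ([n].reverse ++ acc) (by simpa using Nat.le_of_succ_le_succ h)]
        simp
      · have hpre : List.isPrefixOf [o] (c :: t) = false := by
          simp [List.isPrefixOf]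
          exact fun hh => hc hh.symm
        rw [PySem.Chars.replace.go]
        simp only [hpre]
        rw [ih t (c :: acc) (by simpa using Nat.le_of_succ_le_succ h)]
        simp [hc]

theorem replace_single (o n : Char) (l : List Char) :
    PySem.Chars.replace l [o] [n] = l.map (fun c => if c = o then n else c) := by
  rw [PySem.Chars.replace]
  simp only [List.isEmpty]
  exact replace_go_single o n l.length l [] (le_refl _)

theorem toList_normalize_ipa (text : String) :
    (normalize_ipa text).toList
      = text.toList.map (fun c =>
          if c = 'g' then 'ɡ' else if c = 'x' then 'χ' else if c = 'r' then 'ʁ' else c) := by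
  unfold normalize_ipa normalize_ipa_replacements
  simp only [List.foldl]
  rw [PySem.Str.toList_replace, PySem.Str.toList_replace, PySem.Str.toList_replace]
  have hg : ("g" : String).toList = ['g'] := rfl
  have hG : ("ɡ" : String).toList = ['ɡ'] := rfl
  have hx : ("x" : String).toList = ['x'] := rfl
  have hX : ("χ" : String).toList = ['χ'] := rfl
  have hr : ("r" : String).toList = ['r'] := rfl
  have hR : ("ʁ" : String).toList = ['ʁ'] := rfl
  rw [hg, hG, hx, hX, hr, hR]
  rw [replace_single, replace_single, replace_single, List.map_map, List.map_map]
  apply List.map_congr_left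
  intro c _
  simp only [Function.comp]
  by_cases h1 : c = 'g'
  · subst h1; decide
  · by_cases h2 : c = 'x'
    · subst h2; decide
    · by_cases h3 : c = 'r'
      · subst h3; decide
      · simp [h1, h2, h3]

theorem toList_normalize_ipa_alt (text : String) :
    (normalize_ipa_alt text).toList
      = text.toList.map (fun c =>
          if c = 'g' then 'ɡ' else if c = 'x' then 'χ' else if c = 'r' then 'ʁ' else c) := by
  unfold normalize_ipa_alt
  simp only [String.toList_ofList]
  apply List.map_congr_left
  intro c _
  by_cases h1 : c = 'g'
  · subst h1; decide
  · by_cases h2 : c = 'x'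
    · subst h2; decide
    · by_cases h3 : c = 'r'
      · subst h3; decide
      · have e1 : ('g' == c) = false := beq_eq_false_iff_ne.mpr (fun h => h1 h.symm)
        have e2 : ('x' == c) = false := beq_eq_false_iff_ne.mpr (fun h => h2 h.symm)
        have e3 : ('r' == c) = false := beq_eq_false_iff_ne.mpr (fun h => h3 h.symm)
        simp [PySem.Dict.getD, PySem.Dict.get?, PySem.Dict.insert, PySem.Dict.empty, List.find?, e1, e2, e3, h1, h2, h3]

-- ===== VERDICT (by name: the statement is the Claim_ definition above) =====
theorem normalize_ipa_spec : Claim_equal_normalize_ipa := by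
  intro text _
  unfold Spec_normalize_ipa
  have h := (toList_normalize_ipa text).trans (toList_normalize_ipa_alt text).symm
  exact String.toList_injective h
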